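-- pv_equiv track=rewrite | github.com/Tomasz-P/BoardGamesScoring | my_package/dir_operations.py | inner_to_outer_dir
-- ===== SOURCE A (Python) =====
-- def inner_to_outer_dir(directory):
--     """Convert an outer directory with outer keys and directories (with inner keys and inner
--     values) as outer values into a new directory. New directory has inner keys as new keys and
--     directories (with outer keys and inner values) as new values.
--     EXAMPLE: outer_dir = {'A':{'a':1,'b':2}, 'B':{'a':2, 'c':5}}
--     new_outer_dir = {'a':{'A':1,'B':2}, 'b':{'A':2, 'B':0}, 'c':{'A':0, 'B':5}}
--     """
--     outer_keys = []
--     inner_keys = []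
--     for outer_key in directory.keys():
--         outer_keys.append(outer_key)
--         for inner_key in directory[outer_key].keys():
--             if inner_key not in inner_keys:
--                 inner_keys.append(inner_key)
--     new_outer_dir = {}
--     for inner_key in inner_keys:
--         new_inner_dir = {}
--         for outer_key in outer_keys:
--             if inner_key in directory[outer_key]:
--                 new_inner_dir[outer_key] = directory[outer_key][inner_key]
--             else:
--                 new_inner_dir[outer_key] = 0
--         new_outer_dir[inner_key] = new_inner_dir
--     return new_outer_dir
-- ===== SOURCE B (Python) =====
-- def inner_to_outer_dir(directory):
--     """Transpose a dict-of-dicts, filling missing cells with 0: prefill a zero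
--     skeleton, then scatter the present values over it in one pass."""
--     outer_keys = list(directory)
--     inner_keys = list(dict.fromkeys(k for inner in directory.values() for k in inner))
--     new = {inner_key: {outer_key: 0 for outer_key in outer_keys} for inner_key in inner_keys}
--     for outer_key, inner in directory.items():
--         for inner_key, value in inner.items():
--             new[inner_key][outer_key] = value
--     return new
-- ===== Notes on version B (the rewrite author's own statement) =====
-- stated objective: simpler
-- what changed: Instead of A's per-cell membership test inside nested construction loops, B collects inner keys with dict.fromkeys, prefills a full zero skeleton by comprehension and scatters the present values over it in one pass over directory.items().
import Mathlib
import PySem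

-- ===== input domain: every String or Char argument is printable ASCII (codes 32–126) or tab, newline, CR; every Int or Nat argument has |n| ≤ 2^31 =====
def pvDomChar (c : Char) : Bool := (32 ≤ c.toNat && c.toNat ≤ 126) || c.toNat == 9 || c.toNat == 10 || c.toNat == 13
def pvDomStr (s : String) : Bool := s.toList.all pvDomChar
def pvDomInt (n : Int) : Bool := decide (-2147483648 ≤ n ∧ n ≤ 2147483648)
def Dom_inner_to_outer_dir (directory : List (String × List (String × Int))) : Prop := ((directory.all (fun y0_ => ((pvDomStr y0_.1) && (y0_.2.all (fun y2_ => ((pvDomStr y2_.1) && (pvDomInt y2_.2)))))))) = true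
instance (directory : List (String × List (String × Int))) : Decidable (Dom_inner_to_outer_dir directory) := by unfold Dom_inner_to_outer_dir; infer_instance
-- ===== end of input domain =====

-- B replaces A's per-cell membership test by key collection with dict.fromkeys, a prefilled
-- zero skeleton and one scatter pass over the items (simpler decomposition, same cost).

-- ===== PORT A =====
-- directory[k]: KeyError impossible in A (k is always one of directory's own keys), so getD's default is never used
def pvDirGet (directory : List (String × List (String × Int))) (k : String) : List (String × Int) :=
  (PySem.Dict.mk directory).getD k []

-- 'for inner_key in directory[outer_key].keys(): if inner_key not in inner_keys: inner_keys.append(inner_key)'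
def pvAddKeys (acc : List String) (inner : List (String × Int)) : List String :=
  inner.foldl (fun acc q => if acc.contains q.1 then acc else acc ++ [q.1]) acc

-- A's first loop: collect outer_keys and first-appearance-ordered inner_keys
def pvPhase1 (directory : List (String × List (String × Int))) : List String × List String :=
  directory.foldl (fun st p => (st.1 ++ [p.1], pvAddKeys st.2 (pvDirGet directory p.1))) ([], [])

-- body of A's second loop: build new_inner_dir for one inner_key
def pvInnerA (directory : List (String × List (String × Int))) (outer_keys : List String) (ik : String) :
    PySem.Dict String Int :=
  outer_keys.foldl (fun nid ok =>
    if (PySem.Dict.mk (pvDirGet directory ok)).contains ik then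
      nid.insert ok ((PySem.Dict.mk (pvDirGet directory ok)).getD ik 0)
    else
      nid.insert ok 0) PySem.Dict.empty

def inner_to_outer_dir (directory : List (String × List (String × Int))) : List (String × List (String × Int)) :=
  let st := pvPhase1 directory
  let new_outer_dir := st.2.foldl (fun nod ik => nod.insert ik (pvInnerA directory st.1 ik)) PySem.Dict.empty
  new_outer_dir.items.map (fun p => (p.1, p.2.items))

-- ===== PORT B =====
def inner_to_outer_dir_alt (directory : List (String × List (String × Int))) : List (String × List (String × Int)) :=
  let outer_keys := directory.map (·.1)
  -- list(dict.fromkeys(k for inner in directory.values() for k in inner))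
  let inner_keys : PySem.Set String := PySem.Set.ofList (directory.flatMap (fun p => p.2.map (·.1)))
  -- {inner_key: {outer_key: 0 for outer_key in outer_keys} for inner_key in inner_keys}
  let skeleton : PySem.Dict String (PySem.Dict String Int) :=
    PySem.Dict.mk (inner_keys.map (fun ik => (ik, PySem.Dict.mk (outer_keys.map (fun ok => (ok, (0 : Int)))))))
  -- scatter: new[inner_key][outer_key] = value (inner_key is always a key of the skeleton, so modify's default is never used)
  let new := directory.foldl (fun new p =>
    p.2.foldl (fun new q => new.modify q.1 PySem.Dict.empty (fun d => d.insert p.1 q.2)) new) skeleton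
  new.items.map (fun p => (p.1, p.2.items))

-- ===== PRECONDITION & SPEC =====
-- Pre_ excludes association lists with a duplicate outer key or a duplicate key inside an inner
-- list: those do not represent Python dicts (a dict cannot hold duplicate keys), and A's
-- first-match lookup versus B's overwriting scatter are both accidental there.
def Pre_inner_to_outer_dir (directory : List (String × List (String × Int))) : Prop :=
  (directory.map (·.1)).Nodup ∧ ∀ p ∈ directory, (p.2.map (·.1)).Nodup
instance (directory : List (String × List (String × Int))) : Decidable (Pre_inner_to_outer_dir directory) := by
  unfold Pre_inner_to_outer_dir; infer_instance
def pvWitness_inner_to_outer_dir : (List (String × List (String × Int))) :=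
  [("A", [("a", 1), ("b", 2)]), ("B", [("a", 2), ("c", 5)])]
def Spec_inner_to_outer_dir (directory : List (String × List (String × Int))) (out : List (String × List (String × Int))) : Prop := out = inner_to_outer_dir_alt directory
instance (directory : List (String × List (String × Int))) (out : List (String × List (String × Int))) : Decidable (Spec_inner_to_outer_dir directory out) := by unfold Spec_inner_to_outer_dir; infer_instance

-- ===== CLAIM (what is proved, stated in full; the proofs are below) =====
def Claim_equal_inner_to_outer_dir : Prop := ∀ (directory : List (String × List (String × Int))), Dom_inner_to_outer_dir directory → Pre_inner_to_outer_dir directory → Spec_inner_to_outer_dir directory (inner_to_outer_dir directory)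

-- ===== LEMMAS AND PROOFS =====

-- the common normal form both ports are reduced to
def pvIK (directory : List (String × List (String × Int))) : List String :=
  PySem.Set.ofList (directory.flatMap (fun p => p.2.map (·.1)))

def pvRes (directory : List (String × List (String × Int))) : List (String × List (String × Int)) :=
  (pvIK directory).map (fun ik =>
    (ik, directory.map (fun p => (p.1, (PySem.Dict.mk p.2).getD ik 0))))

theorem pv_dirGet_eq (directory : List (String × List (String × Int)))
    (hnd : (directory.map (·.1)).Nodup) {p : String × List (String × Int)} (hp : p ∈ directory) :
    pvDirGet directory p.1 = p.2 := by
  apply PySem.Dict.getD_of_mem_items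
  · simpa using hp
  · simpa [PySem.Dict.keys_mk] using hnd

theorem pv_addKeys_eq (acc : List String) (inner : List (String × Int)) :
    pvAddKeys acc inner = PySem.Set.update acc (inner.map (·.1)) := by
  rw [pvAddKeys, PySem.Set.update_map_eq_foldl_add]; rfl

theorem pv_phase1_gen (l : List (String × List (String × Int))) (a : List String) (b : PySem.Set String) :
    l.foldl (fun st p => (st.1 ++ [p.1], PySem.Set.update st.2 (p.2.map (·.1)))) (a, b)
      = (a ++ l.map (·.1), PySem.Set.update b (l.flatMap (fun p => p.2.map (·.1)))) := by
  induction l generalizing a b with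
  | nil => simp [PySem.Set.update_nil]
  | cons p l ih => simp [List.foldl_cons, ih, PySem.Set.update_append]

theorem pv_phase1_eq (directory : List (String × List (String × Int)))
    (hnd : (directory.map (·.1)).Nodup) :
    pvPhase1 directory = (directory.map (·.1), pvIK directory) := by
  rw [pvPhase1]
  have h := PySem.List.foldl_congr_mem (l := directory)
    (init := (([], []) : List String × List String))
    (f := fun st p => (st.1 ++ [p.1], pvAddKeys st.2 (pvDirGet directory p.1)))
    (g := fun st p => (st.1 ++ [p.1], PySem.Set.update st.2 (p.2.map (·.1))))
    (by intro acc p hp; simp only []; rw [pv_dirGet_eq directory hnd hp, pv_addKeys_eq])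
  rw [h, pv_phase1_gen]
  simp [PySem.Set.update_nil_left, pvIK]

theorem pv_innerA_items (directory : List (String × List (String × Int)))
    (hnd : (directory.map (·.1)).Nodup) (ik : String) :
    (pvInnerA directory (directory.map (·.1)) ik).items
      = directory.map (fun p => (p.1, (PySem.Dict.mk p.2).getD ik 0)) := by
  rw [pvInnerA, List.foldl_map]
  have h := PySem.List.foldl_congr_mem (l := directory)
    (init := (PySem.Dict.empty : PySem.Dict String Int))
    (f := fun nid p =>
      if (PySem.Dict.mk (pvDirGet directory p.1)).contains ik then
        nid.insert p.1 ((PySem.Dict.mk (pvDirGet directory p.1)).getD ik 0)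
      else nid.insert p.1 0)
    (g := fun nid p => nid.insert p.1 ((PySem.Dict.mk p.2).getD ik 0))
    (by
      intro acc p hp
      simp only []
      rw [pv_dirGet_eq directory hnd hp]
      cases hc : (PySem.Dict.mk p.2).contains ik with
      | true => simp
      | false => rw [PySem.Dict.getD_of_not_contains _ _ hc]; simp)
  rw [h]
  rw [PySem.Dict.items_foldl_insert_fresh directory (fun p => p.1)
    (fun p => (PySem.Dict.mk p.2).getD ik 0) PySem.Dict.empty
    (by intro a ha; simp [PySem.Dict.contains_empty]) hnd]
  simp [PySem.Dict.empty]

theorem pv_A_eq (directory : List (String × List (String × Int)))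
    (hnd : (directory.map (·.1)).Nodup) :
    inner_to_outer_dir directory = pvRes directory := by
  rw [inner_to_outer_dir]
  simp only [pv_phase1_eq directory hnd]
  rw [PySem.Dict.items_foldl_insert_fresh (pvIK directory) (fun ik => ik)
    (fun ik => pvInnerA directory (directory.map (·.1)) ik) PySem.Dict.empty
    (by intro a ha; simp [PySem.Dict.contains_empty]) (by simpa using PySem.Set.nodup_ofList _)]
  simp only [PySem.Dict.empty, List.nil_append, List.map_map, pvRes]
  apply List.map_congr_left
  intro ik hik
  simp [pv_innerA_items directory hnd ik]

-- generic: Set.update with a subset is the identity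
theorem pv_update_subset (s : PySem.Set String) (xs : List String) (h : ∀ x ∈ xs, x ∈ s) :
    PySem.Set.update s xs = s := by
  rw [PySem.Set.update_eq_append_filter]
  have : List.filter (fun y => !s.contains y) (PySem.Set.ofList xs) = [] := by
    apply List.filter_eq_nil_iff.mpr
    intro y hy
    have : y ∈ s := h y ((PySem.Set.mem_ofList xs y).mp hy)
    simp [PySem.Set.contains, this]
  rw [this, List.append_nil]

-- flatten the nested scatter loop into one fold over key/outer/value triples
theorem pv_flatten (directory : List (String × List (String × Int)))
    (S : PySem.Dict String (PySem.Dict String Int)) :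
    directory.foldl (fun new p =>
        p.2.foldl (fun new q => new.modify q.1 PySem.Dict.empty (fun d => d.insert p.1 q.2)) new) S
      = (directory.flatMap (fun p => p.2.map (fun q => (q.1, p.1, q.2)))).foldl
          (fun new t => new.modify t.1 PySem.Dict.empty (fun d => d.insert t.2.1 t.2.2)) S := by
  induction directory generalizing S with
  | nil => rfl
  | cons p l ih =>
    simp only [List.foldl_cons, List.flatMap_cons, List.foldl_append, List.foldl_map, ih]

-- per-key view of the scatter fold
theorem pv_getD_scatter (T : List (String × String × Int))
    (S : PySem.Dict String (PySem.Dict String Int)) (k : String) :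
    ((T.foldl (fun new t => new.modify t.1 PySem.Dict.empty (fun d => d.insert t.2.1 t.2.2)) S).getD k PySem.Dict.empty)
      = (T.filter (fun t => t.1 == k)).foldl (fun d t => d.insert t.2.1 t.2.2) (S.getD k PySem.Dict.empty) := by
  induction T generalizing S with
  | nil => rfl
  | cons t T ih =>
    simp only [List.foldl_cons, List.filter_cons, ih]
    by_cases h : t.1 = k
    · simp [h]
    · have : (t.1 == k) = false := by simp [h]
      simp [this, PySem.Dict.getD_modify, Ne.symm h]

-- 'for x in l: if c x: out.append(f x)' as filter+map, in flatMap form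
theorem pv_flatMap_ite {α β : Type} (l : List α) (c : α → Bool) (f : α → β) :
    l.flatMap (fun x => if c x then [f x] else []) = (l.filter c).map f := by
  induction l with
  | nil => rfl
  | cons x l ih => by_cases h : c x <;> simp [h, ih]

-- a nodup association list filtered at one key
theorem pv_filter_key (l : List (String × Int)) (hnd : (l.map (·.1)).Nodup) (ik : String) :
    l.filter (fun q => q.1 == ik)
      = (if (PySem.Dict.mk l).contains ik then [(ik, (PySem.Dict.mk l).getD ik 0)] else []) := by
  induction l with
  | nil => simp [PySem.Dict.contains]
  | cons q l ih =>
    simp only [List.map_cons, List.nodup_cons] at hnd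
    have hc : (PySem.Dict.mk (q :: l)).contains ik = (q.1 == ik || (PySem.Dict.mk l).contains ik) := by
      rw [PySem.Dict.contains_eq_isSome_get?, PySem.Dict.contains_eq_isSome_get?,
        PySem.Dict.get?_mk_cons]
      by_cases h : q.1 = ik <;> simp [h]
    by_cases h : q.1 = ik
    · have hne : ∀ r ∈ l, ¬(r.1 == ik) := by
        intro r hr
        simp only [beq_iff_eq]
        intro he
        exact hnd.1 (by rw [← h] at he; exact he ▸ List.mem_map_of_mem hr)
      have hf : l.filter (fun q => q.1 == ik) = [] := List.filter_eq_nil_iff.mpr hne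
      have hg : (PySem.Dict.mk (q :: l)).getD ik 0 = q.2 := by
        rw [PySem.Dict.getD_eq_get?_getD, PySem.Dict.get?_mk_cons]
        simp [h]
      simp [h, hf, hc, hg, Prod.ext_iff]
    · have hb : (q.1 == ik) = false := by simp [h]
      have hg : (PySem.Dict.mk (q :: l)).getD ik 0 = (PySem.Dict.mk l).getD ik 0 := by
        rw [PySem.Dict.getD_eq_get?_getD, PySem.Dict.get?_mk_cons]
        rw [if_neg (by simp [h])]
        rw [← PySem.Dict.getD_eq_get?_getD]
      simp only [List.filter_cons, hb, ih hnd.2, hc, hg, Bool.false_or]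
      simp

-- untouched key passes through an insert fold
theorem pv_getD_foldl_insert_ne {β : Type} (l : List β) (key : β → String) (v : β → Int)
    (d : PySem.Dict String Int) (k : String) (h : ∀ b ∈ l, key b ≠ k) :
    (l.foldl (fun d b => d.insert (key b) (v b)) d).getD k 0 = d.getD k 0 := by
  induction l generalizing d with
  | nil => rfl
  | cons b l ih =>
    rw [List.foldl_cons, ih _ (fun b hb => h b (List.mem_cons_of_mem _ hb)),
      PySem.Dict.getD_insert, if_neg (fun he => h b (List.mem_cons_self) he.symm)]

-- the value at k after an insert fold with nodup keys
theorem pv_getD_foldl_insert {β : Type} (l : List β) (key : β → String) (v : β → Int)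
    (d : PySem.Dict String Int) (k : String) (hnd : (l.map key).Nodup) :
    (l.foldl (fun d b => d.insert (key b) (v b)) d).getD k 0
      = match l.find? (fun b => key b == k) with
        | some b => v b
        | none => d.getD k 0 := by
  induction l generalizing d with
  | nil => rfl
  | cons b l ih =>
    simp only [List.map_cons, List.nodup_cons] at hnd
    rw [List.foldl_cons, List.find?_cons]
    by_cases h : key b = k
    · have : ∀ b' ∈ l, key b' ≠ k := by
        intro b' hb' he
        exact hnd.1 (h ▸ he ▸ List.mem_map_of_mem hb')
      rw [pv_getD_foldl_insert_ne l key v _ k this, PySem.Dict.getD_insert, if_pos h.symm]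
      simp [h]
    · have hb : (key b == k) = false := by simp [h]
      rw [hb, ih _ hnd.2]
      cases hf : l.find? (fun b => key b == k) with
      | some b' => rfl
      | none => simp [PySem.Dict.getD_insert, Ne.symm h]

-- find? at p.1 in a filtered nodup association list
theorem pv_find_filter (directory : List (String × List (String × Int)))
    (hnd : (directory.map (·.1)).Nodup) (c : (String × List (String × Int)) → Bool)
    {p : String × List (String × Int)} (hp : p ∈ directory) :
    (directory.filter c).find? (fun b => b.1 == p.1) = if c p then some p else none := by
  induction directory with
  | nil => cases hp
  | cons b l ih =>
    simp only [List.map_cons, List.nodup_cons] at hnd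
    rcases List.mem_cons.mp hp with he | hm
    · subst he
      rw [List.filter_cons]
      by_cases hc : c p
      · simp [hc]
      · have hnone : (l.filter c).find? (fun b => b.1 == p.1) = none := by
          apply List.find?_eq_none.mpr
          intro x hx
          simp only [beq_iff_eq]
          intro he
          exact hnd.1 (he ▸ List.mem_map_of_mem (List.mem_of_mem_filter hx))
        simp [hc, hnone]
    · have hne : (b.1 == p.1) = false := by
        simp only [beq_eq_false_iff_ne, ne_eq]
        intro he
        exact hnd.1 (he ▸ List.mem_map_of_mem hm)
      rw [List.filter_cons]
      by_cases hc : c b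
      · simp only [hc, if_pos, List.find?_cons, hne]
        exact ih hnd.2 hm
      · simp only [hc, Bool.false_eq_true, reduceIte]
        exact ih hnd.2 hm

-- the zero-filled skeleton row
def pvZ (directory : List (String × List (String × Int))) : PySem.Dict String Int :=
  PySem.Dict.mk ((directory.map (·.1)).map (fun ok => (ok, (0 : Int))))

theorem pvZ_keys (directory : List (String × List (String × Int))) :
    (pvZ directory).keys = directory.map (·.1) := by
  simp [pvZ, PySem.Dict.keys_mk]

theorem pvZ_getD (directory : List (String × List (String × Int)))
    (hnd : (directory.map (·.1)).Nodup) {k : String} (hk : k ∈ directory.map (·.1)) :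
    (pvZ directory).getD k 0 = 0 := by
  apply PySem.Dict.getD_of_mem_items
  · simp only [pvZ]
    exact List.mem_map_of_mem hk
  · rw [pvZ_keys]; exact hnd

-- the triples relevant to one inner key ik
theorem pv_filter_triples (directory : List (String × List (String × Int)))
    (hnd : (directory.map (·.1)).Nodup)
    (hin : ∀ p ∈ directory, (p.2.map (·.1)).Nodup) (ik : String) :
    (directory.flatMap (fun p => p.2.map (fun q => (q.1, p.1, q.2)))).filter (fun t => t.1 == ik)
      = (directory.filter (fun p => (PySem.Dict.mk p.2).contains ik)).map
          (fun p => (ik, p.1, (PySem.Dict.mk p.2).getD ik 0)) := by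
  rw [← pv_flatMap_ite]
  induction directory with
  | nil => rfl
  | cons p l ihl =>
    rw [List.flatMap_cons, List.flatMap_cons, List.filter_append,
      ihl (by simpa using (List.nodup_cons.mp (by simpa using hnd)).2)
        (fun p hp => hin p (List.mem_cons_of_mem _ hp))]
    congr 1
    rw [List.filter_map]
    simp only [Function.comp_def]
    rw [pv_filter_key p.2 (hin p List.mem_cons_self) ik]
    by_cases hcp : (PySem.Dict.mk p.2).contains ik
    · simp [hcp]
    · simp only [Bool.not_eq_true] at hcp; simp [hcp]

-- one row of B's result after the scatter
theorem pv_row_items (directory : List (String × List (String × Int)))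
    (hnd : (directory.map (·.1)).Nodup)
    (hin : ∀ p ∈ directory, (p.2.map (·.1)).Nodup) (ik : String) :
    (((directory.flatMap (fun p => p.2.map (fun q => (q.1, p.1, q.2)))).filter
        (fun t => t.1 == ik)).foldl (fun d t => d.insert t.2.1 t.2.2) (pvZ directory)).items
      = directory.map (fun p => (p.1, (PySem.Dict.mk p.2).getD ik 0)) := by
  rw [pv_filter_triples directory hnd hin ik, List.foldl_map]
  have hsub : (directory.filter (fun p => (PySem.Dict.mk p.2).contains ik)).Sublist directory :=
    List.filter_sublist
  have hndf : ((directory.filter (fun p => (PySem.Dict.mk p.2).contains ik)).map (·.1)).Nodup :=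
    (hsub.map (·.1)).nodup hnd
  have hkeys : ((directory.filter (fun p => (PySem.Dict.mk p.2).contains ik)).foldl
      (fun d p => d.insert p.1 ((PySem.Dict.mk p.2).getD ik 0)) (pvZ directory)).keys
      = directory.map (·.1) := by
    rw [PySem.Dict.keys_foldl_insert_key
      (List.filter (fun p => (PySem.Dict.mk p.2).contains ik) directory)
      (fun p : String × List (String × Int) => p.1)
      (fun _ p => (PySem.Dict.mk p.2).getD ik 0) (pvZ directory), pvZ_keys]
    exact pv_update_subset _ _ (by
      intro x hx
      rcases List.mem_map.mp hx with ⟨p, hp, he⟩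
      exact he ▸ List.mem_map_of_mem (List.mem_of_mem_filter hp))
  rw [PySem.Dict.items_eq_map_keys _ (hkeys ▸ hnd) 0, hkeys, List.map_map]
  apply List.map_congr_left
  intro p hp
  simp only [Function.comp]
  rw [pv_getD_foldl_insert _ (fun p : String × List (String × Int) => p.1)
      (fun p => (PySem.Dict.mk p.2).getD ik 0) _ _ hndf,
    pv_find_filter directory hnd _ hp]
  by_cases hcp : (PySem.Dict.mk p.2).contains ik
  · simp [hcp]
  · simp only [Bool.not_eq_true] at hcp
    rw [PySem.Dict.getD_of_not_contains _ _ hcp]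
    simp only [hcp, Bool.false_eq_true, if_false]
    rw [pvZ_getD directory hnd (List.mem_map_of_mem hp)]

theorem pv_B_eq (directory : List (String × List (String × Int)))
    (hnd : (directory.map (·.1)).Nodup)
    (hin : ∀ p ∈ directory, (p.2.map (·.1)).Nodup) :
    inner_to_outer_dir_alt directory = pvRes directory := by
  rw [inner_to_outer_dir_alt]
  rw [pv_flatten]
  rw [show PySem.Dict.mk ((directory.map (·.1)).map (fun ok => (ok, (0 : Int)))) = pvZ directory from rfl,
    show PySem.Set.ofList (directory.flatMap (fun p => p.2.map (·.1))) = pvIK directory from rfl]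
  set S : PySem.Dict String (PySem.Dict String Int) :=
    PySem.Dict.mk ((pvIK directory).map (fun ik => (ik, pvZ directory))) with hS
  set T := directory.flatMap (fun p => p.2.map (fun q => (q.1, p.1, q.2))) with hT
  have hSkeys : S.keys = pvIK directory := by
    rw [hS, PySem.Dict.keys_mk, List.map_map]
    exact List.map_id _
  have hIKnd : (pvIK directory).Nodup := PySem.Set.nodup_ofList _
  have hkeys : (T.foldl (fun new t =>
      new.modify t.1 PySem.Dict.empty (fun d => d.insert t.2.1 t.2.2)) S).keys = pvIK directory := by
    rw [PySem.Dict.keys_foldl_modify_key T (fun t : String × String × Int => t.1)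
      PySem.Dict.empty (fun _ t => fun d => d.insert t.2.1 t.2.2) S, hSkeys]
    apply pv_update_subset
    intro x hx
    rcases List.mem_map.mp hx with ⟨t, ht, he⟩
    rw [hT] at ht
    rcases List.mem_flatMap.mp ht with ⟨p, hp, hq⟩
    rcases List.mem_map.mp hq with ⟨q, hq2, he2⟩
    rw [pvIK, PySem.Set.mem_ofList]
    apply List.mem_flatMap.mpr
    exact ⟨p, hp, by rw [← he, ← he2]; exact List.mem_map_of_mem hq2⟩
  have hnodN : (T.foldl (fun new t =>
      new.modify t.1 PySem.Dict.empty (fun d => d.insert t.2.1 t.2.2)) S).keys.Nodup :=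
    hkeys ▸ hIKnd
  rw [PySem.Dict.items_eq_map_keys _ hnodN PySem.Dict.empty, hkeys, List.map_map]
  rw [pvRes]
  apply List.map_congr_left
  intro ik hik
  simp only [Function.comp]
  rw [pv_getD_scatter]
  have hSik : S.getD ik PySem.Dict.empty = pvZ directory := by
    apply PySem.Dict.getD_of_mem_items
    · rw [hS]
      exact List.mem_map_of_mem hik
    · rw [hSkeys]; exact hIKnd
  rw [hSik]
  rw [pv_row_items directory hnd hin ik]

-- ===== VERDICT (by name: the statement is the Claim_ definition above) =====
theorem inner_to_outer_dir_spec : Claim_equal_inner_to_outer_dir := by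
  intro directory _ hpre
  unfold Spec_inner_to_outer_dir
  rw [pv_A_eq directory hpre.1, pv_B_eq directory hpre.1 hpre.2]
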